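-- pv_equiv track=rewrite | github.com/Tankinou/Workgroup_Assignement_3 | tictactoe.py | solved_vertical
-- ===== SOURCE A (Python) =====
-- def solved_vertical(lst):
--     solved = False
--     for y in range(len(lst)):
--         counter = 0
--         for x in range(len(lst)):
--             if lst[x][y] == 'x':
--                 counter += 1
--             if counter == len(lst):
--                 solved = True
--     return solved
-- ===== SOURCE B (Python) =====
-- def solved_vertical(lst):
--     n = len(lst)
--     candidates = list(range(n))
--     for row in lst:
--         candidates = [y for y in candidates if row[y] == 'x']
--     return bool(candidates)
-- ===== Notes on version B (the rewrite author's own statement) =====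
-- stated objective: faster
-- what changed: B replaces A's column-major counter loop (which reads every cell of every column) with a row-major candidate-elimination pass: it keeps the list of column indices still all-'x' and filters it through each row, so columns already ruled out are never inspected again.
import Mathlib
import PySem

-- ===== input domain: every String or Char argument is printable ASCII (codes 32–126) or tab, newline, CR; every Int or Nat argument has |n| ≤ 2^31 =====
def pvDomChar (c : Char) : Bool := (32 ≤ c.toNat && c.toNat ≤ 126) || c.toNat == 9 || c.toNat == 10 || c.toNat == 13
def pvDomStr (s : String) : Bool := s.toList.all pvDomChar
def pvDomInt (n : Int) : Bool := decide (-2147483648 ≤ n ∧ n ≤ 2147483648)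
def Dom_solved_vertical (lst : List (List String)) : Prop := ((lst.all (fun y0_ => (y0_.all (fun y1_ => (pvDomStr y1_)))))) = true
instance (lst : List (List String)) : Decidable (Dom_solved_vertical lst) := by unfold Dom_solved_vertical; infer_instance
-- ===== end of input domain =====

-- ===== PORT A =====
-- Header: B replaces A's column-major counter loop with a row-major candidate-elimination pass
-- (filter the surviving column indices through each row); return-value equivalence on rectangular inputs.
-- Literal port of A: outer fold over range(len), inner fold carrying (counter, solved); out-of-range reads (excluded by Pre_) default.
def solved_vertical (lst : List (List String)) : Bool :=
  let solved := false
  let solved := (PySem.List.pyRange 0 lst.length 1).foldl (fun solved y =>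
    let counter : Int := 0
    ((PySem.List.pyRange 0 lst.length 1).foldl (fun (st : Int × Bool) x =>
        let counter := if PySem.List.pyGetD (PySem.List.pyGetD lst x []) y "" == "x" then st.1 + 1 else st.1
        let solved := if counter = (lst.length : Int) then true else st.2
        (counter, solved)) (counter, solved)).2) solved
  solved

-- ===== PORT B =====
-- Literal port of B: candidates = list(range(n)); filtered through each row; bool(candidates).
def solved_vertical_alt (lst : List (List String)) : Bool :=
  let n := lst.length
  let candidates := PySem.List.pyRange 0 (n : Int) 1
  let candidates := lst.foldl (fun cand row =>
    cand.filter (fun y => PySem.List.pyGetD row y "" == "x")) candidates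
  !candidates.isEmpty

-- ===== PRECONDITION & SPEC =====
-- Pre_ excludes exactly the ragged inputs (some row shorter than the number of rows), on which Python A raises IndexError.
def Pre_solved_vertical (lst : List (List String)) : Prop :=
  ∀ r ∈ lst, lst.length ≤ r.length
instance (lst : List (List String)) : Decidable (Pre_solved_vertical lst) := by unfold Pre_solved_vertical; infer_instance
def pvWitness_solved_vertical : List (List String) := [["x", "o"], ["x", "o"]]

def Spec_solved_vertical (lst : List (List String)) (out : Bool) : Prop := out = solved_vertical_alt lst
instance (lst : List (List String)) (out : Bool) : Decidable (Spec_solved_vertical lst out) := by unfold Spec_solved_vertical; infer_instance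

-- ===== CLAIM (what is proved, stated in full; the proofs are below) =====
def Claim_equal_solved_vertical : Prop := ∀ (lst : List (List String)), Dom_solved_vertical lst → Pre_solved_vertical lst → Spec_solved_vertical lst (solved_vertical lst)

-- ===== LEMMAS AND PROOFS =====

-- Helper: the flag A's inner loop computes — fires iff the running counter ever equals n after a step.
def pvFire (p : Int → Bool) (n : Int) : List Int → Int → Bool
  | [], _ => false
  | a :: xs, c =>
    let c' := if p a then c + 1 else c
    (c' == n) || pvFire p n xs c'

theorem pvInner_eq (p : Int → Bool) (n : Int) :
    ∀ (xs : List Int) (c : Int) (s : Bool),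
      xs.foldl (fun (st : Int × Bool) x =>
        ((if p x then st.1 + 1 else st.1),
         if (if p x then st.1 + 1 else st.1) = n then true else st.2)) (c, s)
      = (c + (xs.countP p : Int), s || pvFire p n xs c) := by
  intro xs
  induction xs with
  | nil => intro c s; simp [pvFire]
  | cons a xs ih =>
    intro c s
    simp only [List.foldl_cons, List.countP_cons, pvFire]
    by_cases hp : p a
    · simp only [hp, if_true, ih, Prod.mk.injEq]
      constructor
      · push_cast; ring
      · by_cases hc : c + 1 = n
        · simp [hc]
        · have hb : ((c + 1 : Int) == n) = false := by simp [hc]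
          rw [hb]; simp [hc]
    · simp only [hp, if_false, ih, Bool.false_eq_true, Prod.mk.injEq]
      constructor
      · push_cast; ring
      · by_cases hc : c = n
        · simp [hc]
        · have hb : ((c : Int) == n) = false := by simp [hc]
          rw [hb]; simp [hc]

theorem pvFire_false (p : Int → Bool) (n : Int) :
    ∀ (xs : List Int) (c : Int), c + (xs.countP p : Int) < n → pvFire p n xs c = false := by
  intro xs
  induction xs with
  | nil => intro c _; rfl
  | cons a xs ih =>
    intro c h
    simp only [List.countP_cons] at h
    by_cases hp : p a
    · simp only [pvFire, hp, if_true]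
      have h' : (c + 1) + (xs.countP p : Int) < n := by simp [hp] at h; omega
      have : c + 1 ≠ n := by
        have : (0:Int) ≤ (xs.countP p : Int) := by positivity
        omega
      simp [this, ih _ h']
    · simp only [pvFire, hp]
      have h' : c + (xs.countP p : Int) < n := by simp [hp] at h; omega
      have : c ≠ n := by
        have : (0:Int) ≤ (xs.countP p : Int) := by positivity
        omega
      simp [this, ih _ h']

theorem pvFire_true (p : Int → Bool) (n : Int) :
    ∀ (xs : List Int) (c : Int), c ≤ n → c + (xs.countP p : Int) = n → xs ≠ [] →
      pvFire p n xs c = true := by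
  intro xs
  induction xs with
  | nil => intro c _ _ h; exact absurd rfl h
  | cons a xs ih =>
    intro c hle heq _
    simp only [List.countP_cons] at heq
    by_cases hp : p a
    · simp only [pvFire, hp, if_true]
      by_cases hc : c + 1 = n
      · simp [hc]
      · have h1 : (c + 1) + (xs.countP p : Int) = n := by simp [hp] at heq; omega
        have h2 : c + 1 ≤ n := by
          have : (0:Int) ≤ (xs.countP p : Int) := by positivity
          omega
        have hne : xs ≠ [] := by
          rintro rfl
          simp at h1; omega
        simp [ih _ h2 h1 hne]
    · simp only [pvFire, hp]
      by_cases hc : c = n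
      · simp [hc]
      · have h1 : c + (xs.countP p : Int) = n := by simp [hp] at heq; omega
        have hne : xs ≠ [] := by
          rintro rfl
          simp at h1; omega
        simp [ih _ hle h1 hne]

theorem pvFoldl_or_any {α : Type} (F : Bool → α → Bool) (g : α → Bool)
    (h : ∀ s y, F s y = (s || g y)) :
    ∀ (ys : List α) (s : Bool), ys.foldl F s = (s || ys.any g) := by
  intro ys
  induction ys with
  | nil => intro s; simp
  | cons y ys ih =>
    intro s
    simp only [List.foldl_cons, List.any_cons, h, ih, Bool.or_assoc]

-- bool(candidates): a filtered list is nonempty iff some element passes.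
theorem pvAny_filter {α : Type} (l : List α) (g : α → Bool) : l.any g = !(l.filter g).isEmpty := by
  induction l with
  | nil => rfl
  | cons a t ih => by_cases h : g a <;> simp [h, ih]

-- B's loop: the fold of per-row filters equals one filter by "all rows pass".
theorem pvFoldl_filter {α β : Type} (p : β → α → Bool) :
    ∀ (rows : List β) (c : List α),
      rows.foldl (fun cand row => cand.filter (p row)) c
      = c.filter (fun y => rows.all (fun row => p row y)) := by
  intro rows
  induction rows with
  | nil => intro c; simp
  | cons r rs ih =>
    intro c
    simp only [List.foldl_cons, ih, List.filter_filter, List.all_cons]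
    exact List.filter_congr (fun y _ => Bool.and_comm _ _)

-- ===== VERDICT (by name: the statement is the Claim_ definition above) =====
theorem solved_vertical_spec : Claim_equal_solved_vertical := by
  intro lst _ _
  unfold Spec_solved_vertical solved_vertical solved_vertical_alt
  rcases hlst : lst with _ | ⟨r, rs⟩
  · simp [PySem.List.pyRange_one_eq_nil]
  · rw [← hlst]
    have hn : 1 ≤ lst.length := by rw [hlst]; simp
    set n := lst.length with hnd
    set xs := PySem.List.pyRange 0 (n : Int) 1 with hxs
    have hlen : xs.length = n := by
      rw [hxs, PySem.List.length_pyRange_one]; omega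
    have hxne : xs ≠ [] := by
      intro h
      rw [h] at hlen; simp at hlen; omega
    -- per-column: the inner fold's flag equals s || (column y is all 'x')
    have hcol : ∀ (s : Bool) (y : Int),
        (xs.foldl (fun (st : Int × Bool) x =>
          ((if PySem.List.pyGetD (PySem.List.pyGetD lst x []) y "" == "x" then st.1 + 1 else st.1),
           if (if PySem.List.pyGetD (PySem.List.pyGetD lst x []) y "" == "x" then st.1 + 1 else st.1)
               = (n : Int) then true else st.2)) (0, s)).2
        = (s || (xs.map (fun x => PySem.List.pyGetD (PySem.List.pyGetD lst x []) y "")).all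
              (fun c => c == "x")) := by
      intro s y
      set p : Int → Bool := fun x => PySem.List.pyGetD (PySem.List.pyGetD lst x []) y "" == "x" with hp
      rw [pvInner_eq p (n : Int) xs 0 s]
      simp only [List.all_map]
      by_cases hall : xs.countP p = xs.length
      · have h1 : (0 : Int) + (xs.countP p : Int) = (n : Int) := by
          rw [hall, hlen]; omega
        rw [pvFire_true p (n : Int) xs 0 (by omega) h1 hxne]
        have hfor : ∀ x ∈ xs, PySem.List.pyGetD (PySem.List.pyGetD lst x []) y "" = "x" := by
          intro x hx
          have h2 := (List.countP_eq_length).mp hall x hx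
          rw [hp] at h2
          simpa using h2
        have ht : xs.all ((fun c => c == "x") ∘ fun x =>
            PySem.List.pyGetD (PySem.List.pyGetD lst x []) y "") = true := by
          rw [List.all_eq_true]
          intro x hx
          simp [hfor x hx]
        rw [ht]
      · have hlt : xs.countP p < xs.length := lt_of_le_of_ne (List.countP_le_length) hall
        have h1 : (0 : Int) + (xs.countP p : Int) < (n : Int) := by
          rw [← hlen]; omega
        rw [pvFire_false p (n : Int) xs 0 h1]
        have hex : ∃ x ∈ xs, ¬ PySem.List.pyGetD (PySem.List.pyGetD lst x []) y "" = "x" := by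
          by_contra hno
          push Not at hno
          exact hall (List.countP_eq_length.mpr (fun x hx => by rw [hp]; simp [hno x hx]))
        obtain ⟨x0, hx0, hne⟩ := hex
        have hf : xs.all ((fun c => c == "x") ∘ fun x =>
            PySem.List.pyGetD (PySem.List.pyGetD lst x []) y "") = false := by
          rw [List.all_eq_false]
          exact ⟨x0, hx0, by simp [hne]⟩
        rw [hf]
    simp only []
    rw [pvFoldl_or_any _ _ (fun s y => hcol s y) xs false]
    -- B side: fold of filters = one filter; nonemptiness of the filter = any
    rw [pvFoldl_filter (fun row y => PySem.List.pyGetD row y "" == "x") lst xs]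
    simp only [Bool.false_or]
    -- per column y, "all rows (by index) have 'x'" = "all rows have 'x'"
    have hmap : ∀ y : Int,
        (xs.map (fun x => PySem.List.pyGetD (PySem.List.pyGetD lst x []) y "")).all (fun c => c == "x")
        = lst.all (fun row => PySem.List.pyGetD row y "" == "x") := by
      intro y
      have h0 := PySem.List.map_pyGetD_pyRange_zero' lst ([] : List String)
      rw [← hnd] at h0
      rw [← hxs] at h0
      rw [show (fun x => PySem.List.pyGetD (PySem.List.pyGetD lst x []) y "")
            = ((fun row => PySem.List.pyGetD row y "") ∘ (fun x => PySem.List.pyGetD lst x []))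
          from rfl, ← List.map_map, h0, List.all_map]
      rfl
    have hany : xs.any (fun y =>
        (xs.map (fun x => PySem.List.pyGetD (PySem.List.pyGetD lst x []) y "")).all (fun c => c == "x"))
        = xs.any (fun y => lst.all (fun row => PySem.List.pyGetD row y "" == "x")) := by
      simp only [hmap]
    rw [hany, pvAny_filter]
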